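-- pv_equiv track=rewrite | github.com/whrit/flow-agent | benchmark/src/swarm_benchmark/advanced_metrics/token_optimizer.py | _abbreviate_common_terms
-- ===== SOURCE A (Python) =====
-- def _abbreviate_common_terms(content: str) -> str:
--     """Abbreviate commonly used terms."""
--     abbreviations = {
--         'function': 'fn',
--         'parameter': 'param',
--         'variable': 'var',
--         'configuration': 'config',
--         'initialization': 'init',
--         'optimization': 'opt'
--     }
--
--     for full, abbrev in abbreviations.items():
--         content = content.replace(full, abbrev)
--
--     return content
-- ===== SOURCE B (Python) =====
-- import re
--
-- _ABBREVIATIONS = {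
--     'function': 'fn',
--     'parameter': 'param',
--     'variable': 'var',
--     'configuration': 'config',
--     'initialization': 'init',
--     'optimization': 'opt'
-- }
-- _PATTERN = re.compile('|'.join(map(re.escape, _ABBREVIATIONS)))
--
--
-- def _abbreviate_common_terms(content: str) -> str:
--     """Abbreviate commonly used terms (single-pass regex substitution)."""
--     return _PATTERN.sub(lambda m: _ABBREVIATIONS[m.group(0)], content)
-- ===== Notes on version B (the rewrite author's own statement) =====
-- stated objective: idiomatic
-- what changed: Replaces the six sequential whole-string str.replace passes with one precompiled regex alternation applied in a single left-to-right pass over the string; no term overlaps another or any abbreviation, so the one-pass result equals the ordered replace chain.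
import Mathlib
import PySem

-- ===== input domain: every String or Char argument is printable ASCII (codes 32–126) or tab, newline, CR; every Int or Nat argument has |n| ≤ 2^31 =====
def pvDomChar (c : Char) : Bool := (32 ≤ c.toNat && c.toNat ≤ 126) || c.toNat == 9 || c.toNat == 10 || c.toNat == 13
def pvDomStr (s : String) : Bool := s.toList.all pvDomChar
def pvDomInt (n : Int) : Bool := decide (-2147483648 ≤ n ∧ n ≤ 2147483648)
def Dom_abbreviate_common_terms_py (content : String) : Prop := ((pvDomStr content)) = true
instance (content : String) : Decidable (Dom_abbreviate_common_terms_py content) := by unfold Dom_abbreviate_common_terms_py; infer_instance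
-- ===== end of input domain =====

-- B replaces A's six sequential whole-string str.replace passes with ONE left-to-right pass
-- that at each position substitutes the first matching term (the regex-alternation semantics
-- of Source B); objective: idiomatic single-pass substitution (not measurably faster).

-- ===== PORT A =====
def abbreviate_common_terms_py (content : String) : String :=
  let abbreviations : PySem.Dict String String :=
    PySem.Dict.ofList [("function", "fn"), ("parameter", "param"), ("variable", "var"),
                       ("configuration", "config"), ("initialization", "init"),
                       ("optimization", "opt")]
  (PySem.Dict.items abbreviations).foldl (fun c p => PySem.Str.replace c p.1 p.2) content

-- ===== PORT B =====
-- the (term, abbreviation) alternation of Source B's compiled pattern, in the dict's insertion order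
def pvAbbrevTable : List (List Char × List Char) :=
  [("function".toList, "fn".toList), ("parameter".toList, "param".toList),
   ("variable".toList, "var".toList), ("configuration".toList, "config".toList),
   ("initialization".toList, "init".toList), ("optimization".toList, "opt".toList)]

-- first alternative of the pattern matching at this position (regex alternation rule)
def pvFirstMatch (ps : List (List Char × List Char)) (l : List Char) :
    Option (List Char × List Char) :=
  ps.findSome? (fun p => if p.1.isPrefixOf l then some p else none)

-- hand port of Source B's pattern.sub for an alternation of literal strings — exact for such a
-- pattern: scan left to right, at each position emit the replacement of the first matching
-- alternative and skip the match, else copy the character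
def pvScan (ps : List (List Char × List Char)) : List Char → List Char
  | [] => []
  | c :: t =>
    match pvFirstMatch ps (c :: t) with
    | some p => p.2 ++ pvScan ps (t.drop (p.1.length - 1))
    | none => c :: pvScan ps t
termination_by l => l.length
decreasing_by
  · simp only [List.length_cons, List.length_drop]; omega
  · simp

def abbreviate_common_terms_py_alt (content : String) : String :=
  String.ofList (pvScan pvAbbrevTable content.toList)

-- ===== PRECONDITION & SPEC =====
def Spec_abbreviate_common_terms_py (content : String) (out : String) : Prop := out = abbreviate_common_terms_py_alt content
instance (content : String) (out : String) : Decidable (Spec_abbreviate_common_terms_py content out) := by unfold Spec_abbreviate_common_terms_py; infer_instance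

-- ===== CLAIM (what is proved, stated in full; the proofs are below) =====
def Claim_equal_abbreviate_common_terms_py : Prop := ∀ (content : String), Dom_abbreviate_common_terms_py content → Spec_abbreviate_common_terms_py content (abbreviate_common_terms_py content)

-- ===== LEMMAS AND PROOFS =====

-- normal form of Python's str.replace for a nonempty pattern: one structural scan
def repS (old new : List Char) : List Char → List Char
  | [] => []
  | c :: t =>
    if old.isPrefixOf (c :: t) then new ++ repS old new (t.drop (old.length - 1))
    else c :: repS old new t
termination_by l => l.length
decreasing_by
  · simp only [List.length_cons, List.length_drop]; omega
  · simp

lemma go_eq_repS (old new : List Char) (hold : old ≠ []) :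
    ∀ fuel l acc, l.length ≤ fuel →
      PySem.Chars.replace.go old new fuel l acc = acc.reverse ++ repS old new l := by
  intro fuel
  induction fuel with
  | zero =>
    intro l acc hl
    have : l = [] := List.eq_nil_of_length_eq_zero (Nat.le_zero.mp hl)
    subst this
    simp [PySem.Chars.replace.go, repS]
  | succ n ih =>
    intro l acc hl
    cases l with
    | nil => simp [PySem.Chars.replace.go, repS]
    | cons c t =>
      rw [PySem.Chars.replace.go]
      by_cases h : old.isPrefixOf (c :: t)
      · rw [if_pos h]
        have hdrop : List.drop old.length (c :: t) = t.drop (old.length - 1) := by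
          cases old with
          | nil => exact absurd rfl hold
          | cons _ o => simp
        rw [hdrop, ih _ _ (by simp at hl ⊢; omega)]
        rw [repS, if_pos h]
        simp
      · rw [if_neg h, ih _ _ (by simp at hl ⊢; omega)]
        rw [repS, if_neg h]
        simp

lemma replace_eq_repS (s old new : List Char) (hold : old ≠ []) :
    PySem.Chars.replace s old new = repS old new s := by
  rw [PySem.Chars.replace, if_neg (by simp [List.isEmpty_iff, hold])]
  simpa using go_eq_repS old new hold s.length s [] le_rfl

-- "`old` cannot match starting inside `u`, whatever follows": decidable sufficient check
def pvNoCross (old u : List Char) : Bool :=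
  decide (∀ p, p < u.length → (u.drop p).isPrefixOf old = false ∧ old.isPrefixOf (u.drop p) = false)

lemma nocross_sound (old u : List Char) (h : pvNoCross old u = true) (v : List Char) :
    ∀ p, p < u.length → ¬ old <+: (u.drop p ++ v) := by
  intro p hp hpre
  have h' := of_decide_eq_true h p hp
  rcases List.prefix_or_prefix_of_prefix hpre (List.prefix_append (u.drop p) v) with h1 | h1
  · exact absurd (List.isPrefixOf_iff_prefix.mpr h1) (by simp [h'.2])
  · exact absurd (List.isPrefixOf_iff_prefix.mpr h1) (by simp [h'.1])

lemma repS_append (old new u v : List Char)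
    (h : ∀ p, p < u.length → ¬ old <+: (u.drop p ++ v)) :
    repS old new (u ++ v) = u ++ repS old new v := by
  induction u with
  | nil => simp
  | cons c t ih =>
    have h0 : ¬ old <+: (c :: (t ++ v)) := by simpa using h 0 (by simp)
    rw [List.cons_append, repS, if_neg (by simpa [List.isPrefixOf_iff_prefix] using h0)]
    rw [ih (fun p hp => by simpa using h (p + 1) (by simp; omega))]
    simp

lemma repS_head (old new v : List Char) (hold : old ≠ []) :
    repS old new (old ++ v) = new ++ repS old new v := by
  cases old with
  | nil => exact absurd rfl hold
  | cons c t =>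
    rw [List.cons_append, repS,
      if_pos (List.isPrefixOf_iff_prefix.mpr ⟨v, by simp⟩)]
    simp

lemma scan_cons (ps : List (List Char × List Char)) (c : Char) (t : List Char) :
    pvScan ps (c :: t) =
      match pvFirstMatch ps (c :: t) with
      | some p => p.2 ++ pvScan ps (t.drop (p.1.length - 1))
      | none => c :: pvScan ps t := by
  rw [pvScan]

lemma scan_nil_table (l : List Char) : pvScan [] l = l := by
  induction l with
  | nil => rw [pvScan]
  | cons c t ih => rw [scan_cons]; simp [pvFirstMatch, ih]

lemma firstMatch_none_iff (ps : List (List Char × List Char)) (l : List Char) :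
    pvFirstMatch ps l = none ↔ ∀ p ∈ ps, ¬ p.1 <+: l := by
  simp only [pvFirstMatch, List.findSome?_eq_none_iff]
  constructor
  · intro h p hp hpre
    have := h p hp
    simp [List.isPrefixOf_iff_prefix.mpr hpre] at this
  · intro h p hp
    simp only [ite_eq_right_iff]
    intro hb
    exact absurd (List.isPrefixOf_iff_prefix.mp hb) (h p hp)

lemma scan_append (ps : List (List Char × List Char)) (u v : List Char)
    (h : ∀ p ∈ ps, ∀ q, q < u.length → ¬ p.1 <+: (u.drop q ++ v)) :
    pvScan ps (u ++ v) = u ++ pvScan ps v := by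
  induction u with
  | nil => simp
  | cons c t ih =>
    have hnone : pvFirstMatch ps (c :: (t ++ v)) = none := by
      rw [firstMatch_none_iff]
      intro p hp
      simpa using h p hp 0 (by simp)
    rw [List.cons_append, scan_cons, hnone]
    rw [ih (fun p hp q hq => by simpa using h p hp (q + 1) (by simp; omega))]
    simp

lemma firstMatch_append (ps qs : List (List Char × List Char)) (l : List Char)
    (h : pvFirstMatch ps l = none) :
    pvFirstMatch (ps ++ qs) l = pvFirstMatch qs l := by
  simp only [pvFirstMatch] at *
  rw [List.findSome?_append, h]; rfl

lemma firstMatch_append_some (ps qs : List (List Char × List Char)) (l : List Char)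
    (p : List Char × List Char) (h : pvFirstMatch ps l = some p) :
    pvFirstMatch (ps ++ qs) l = some p := by
  simp only [pvFirstMatch] at *
  rw [List.findSome?_append, h]; rfl

lemma firstMatch_mem (ps : List (List Char × List Char)) (l : List Char)
    (p : List Char × List Char) (h : pvFirstMatch ps l = some p) :
    p ∈ ps ∧ p.1 <+: l := by
  obtain ⟨x, hx, hfx⟩ := List.exists_of_findSome?_eq_some h
  by_cases hb : x.1.isPrefixOf l
  · simp only [hb, if_true, Option.some.injEq] at hfx
    subst hfx
    exact ⟨hx, List.isPrefixOf_iff_prefix.mp hb⟩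
  · simp [hb] at hfx

-- a nonempty remnant of a term that neither begins with nor is begun by an abbreviation
-- is matched literally by the scan
lemma scan_prefix (ps : List (List Char × List Char)) :
    ∀ t w, (∀ w', w' <:+ w → w' ≠ [] → ∀ p ∈ ps, ¬ w' <+: p.2 ∧ ¬ p.2 <+: w') →
      w ≠ [] → w <+: pvScan ps t → w <+: t := by
  intro t
  induction t with
  | nil =>
    intro w hcond hw hpre
    rw [pvScan] at hpre
    exact absurd (List.prefix_nil.mp hpre) hw
  | cons c t' IH =>
    intro w hcond hw hpre
    rw [scan_cons] at hpre
    cases hm : pvFirstMatch ps (c :: t') with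
    | some p =>
      rw [hm] at hpre
      obtain ⟨hpmem, -⟩ := firstMatch_mem ps _ p hm
      have hc := hcond w (List.suffix_refl w) hw p hpmem
      rcases List.prefix_or_prefix_of_prefix hpre (List.prefix_append p.2 _) with h1 | h1
      · exact absurd h1 hc.1
      · exact absurd h1 hc.2
    | none =>
      rw [hm] at hpre
      cases w with
      | nil => exact absurd rfl hw
      | cons wc wt =>
        obtain ⟨hwc, hwt⟩ := by
          rw [List.cons_prefix_cons] at hpre; exact hpre
        subst hwc
        by_cases hwt' : wt = []
        · subst hwt'; exact List.cons_prefix_cons.mpr ⟨rfl, List.nil_prefix⟩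
        · have : wt <+: t' := by
            refine IH wt ?_ hwt' hwt
            intro w' hs hne p hp
            exact hcond w' (hs.trans (List.suffix_cons wc wt)) hne p hp
          exact List.cons_prefix_cons.mpr ⟨rfl, this⟩

def pvSuffOK (u : List Char) (ps : List (List Char × List Char)) : Bool :=
  u.tails.all (fun w => w.isEmpty || ps.all (fun p => !w.isPrefixOf p.2 && !p.2.isPrefixOf w))

lemma suffOK_sound (u : List Char) (ps : List (List Char × List Char))
    (h : pvSuffOK u ps = true) :
    ∀ w', w' <:+ u → w' ≠ [] → ∀ p ∈ ps, ¬ w' <+: p.2 ∧ ¬ p.2 <+: w' := by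
  intro w' hs hne p hp
  have hall := (List.all_eq_true.mp h) w' ((List.mem_tails _ _).mpr hs)
  rcases Bool.or_eq_true_iff.mp hall with h1 | h1
  · exact absurd (List.isEmpty_iff.mp h1) hne
  · have hb := (List.all_eq_true.mp h1) p hp
    rcases Bool.and_eq_true_iff.mp hb with ⟨hb1, hb2⟩
    constructor
    · intro hpre
      simp [List.isPrefixOf_iff_prefix.mpr hpre] at hb1
    · intro hpre
      simp [List.isPrefixOf_iff_prefix.mpr hpre] at hb2

-- the induction step: one more sequential replace = one more alternative in the scan
lemma step (ps : List (List Char × List Char)) (k a : List Char) (hk : k ≠ [])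
    (hA : ∀ p ∈ ps, pvNoCross k p.2 = true)
    (hK : ∀ p ∈ ps, pvNoCross p.1 (k.drop 1) = true)
    (hS : ∀ w', w' <:+ k.drop 1 → w' ≠ [] → ∀ p ∈ ps, ¬ w' <+: p.2 ∧ ¬ p.2 <+: w') :
    ∀ s, repS k a (pvScan ps s) = pvScan (ps ++ [(k, a)]) s := by
  intro s
  induction hn : s.length using Nat.strong_induction_on generalizing s with
  | _ n IH =>
  subst hn
  cases s with
  | nil => rw [pvScan, pvScan, repS]
  | cons c t =>
    cases hm : pvFirstMatch ps (c :: t) with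
    | some p =>
      obtain ⟨hpmem, -⟩ := firstMatch_mem ps _ p hm
      rw [scan_cons, hm]
      rw [repS_append k a p.2 _ (nocross_sound k p.2 (hA p hpmem) _)]
      rw [IH (t.drop (p.1.length - 1)).length (by simp) _ rfl]
      rw [scan_cons, firstMatch_append_some ps _ _ p hm]
    | none =>
      rw [scan_cons, hm]
      by_cases hkp : k <+: (c :: t)
      · -- the new alternative fires at the head
        cases k with
        | nil => exact absurd rfl hk
        | cons kc k' =>
          obtain ⟨hkc, hk'⟩ := List.cons_prefix_cons.mp hkp
          subst hkc
          obtain ⟨rest, hrest⟩ := hk'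
          have hscan_t : pvScan ps t = k' ++ pvScan ps rest := by
            rw [← hrest]
            exact scan_append ps k' rest
              (fun p hp q hq => nocross_sound p.1 (k'.drop 0) (by simpa using hK p hp) _ q (by simpa using hq))
          have hsome : pvFirstMatch (ps ++ [(kc :: k', a)]) (kc :: t) = some (kc :: k', a) := by
            rw [firstMatch_append ps _ _ hm]
            simp only [pvFirstMatch, List.findSome?_cons]
            rw [if_pos (List.isPrefixOf_iff_prefix.mpr hkp)]
          rw [scan_cons, hsome, hscan_t]
          rw [show (kc :: (k' ++ pvScan ps rest)) = (kc :: k') ++ pvScan ps rest from rfl]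
          rw [repS_head _ _ _ hk]
          rw [IH rest.length (by rw [← hrest]; simp) rest rfl]
          have hdrop : t.drop ((kc :: k').length - 1) = rest := by
            rw [← hrest]; simp
          dsimp only
          rw [hdrop]
      · -- no alternative fires: copy the character
        have hW : ¬ k.isPrefixOf (c :: pvScan ps t) := by
          intro hb
          apply hkp
          cases k with
          | nil => exact absurd rfl hk
          | cons kc k' =>
            obtain ⟨hkc, hk'⟩ := List.cons_prefix_cons.mp (List.isPrefixOf_iff_prefix.mp hb)
            subst hkc
            by_cases hk'e : k' = []
            · subst hk'e; exact List.cons_prefix_cons.mpr ⟨rfl, List.nil_prefix⟩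
            · exact List.cons_prefix_cons.mpr ⟨rfl,
                scan_prefix ps t k' (by simpa using hS) hk'e hk'⟩
        rw [repS, if_neg hW]
        rw [IH t.length (by simp) t rfl]
        have hnone : pvFirstMatch (ps ++ [(k, a)]) (c :: t) = none := by
          rw [firstMatch_append ps _ _ hm]
          simp only [pvFirstMatch, List.findSome?_cons]
          rw [if_neg (by intro hb; exact hkp (List.isPrefixOf_iff_prefix.mp hb))]
          rfl
        rw [scan_cons, hnone]

-- A unfolded: the six sequential replaces in dict order
lemma portA_unfold (content : String) : abbreviate_common_terms_py content =
    PySem.Str.replace (PySem.Str.replace (PySem.Str.replace (PySem.Str.replace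
      (PySem.Str.replace (PySem.Str.replace content "function" "fn") "parameter" "param")
      "variable" "var") "configuration" "config") "initialization" "init")
      "optimization" "opt" := by
  show List.foldl (fun c p => PySem.Str.replace c p.1 p.2) content
    (PySem.Dict.items (PySem.Dict.ofList [("function", "fn"), ("parameter", "param"), ("variable", "var"),
       ("configuration", "config"), ("initialization", "init"), ("optimization", "opt")])) = _
  rw [show PySem.Dict.items
    (PySem.Dict.ofList [("function", "fn"), ("parameter", "param"), ("variable", "var"),
                       ("configuration", "config"), ("initialization", "init"),
                       ("optimization", "opt")] : PySem.Dict String String)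
    = [("function", "fn"), ("parameter", "param"), ("variable", "var"),
       ("configuration", "config"), ("initialization", "init"), ("optimization", "opt")] from by decide]
  simp only [List.foldl_cons, List.foldl_nil]

-- the scan over the full table = the chain of the six replaces
lemma chain_eq_scan (s : List Char) :
    pvScan pvAbbrevTable s =
      repS "optimization".toList "opt".toList (repS "initialization".toList "init".toList
        (repS "configuration".toList "config".toList (repS "variable".toList "var".toList
          (repS "parameter".toList "param".toList (repS "function".toList "fn".toList s))))) := by
  have c1 : ∀ s, pvScan (pvAbbrevTable.take 1) s = repS "function".toList "fn".toList s := by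
    intro s
    have h := step [] "function".toList "fn".toList (by decide)
      (by intro p hp; simp at hp) (by intro p hp; simp at hp)
      (by intro w' _ _ p hp; simp at hp) s
    rw [scan_nil_table s] at h
    simpa [pvAbbrevTable] using h.symm
  have c2 : ∀ s, pvScan (pvAbbrevTable.take 2) s =
      repS "parameter".toList "param".toList (pvScan (pvAbbrevTable.take 1) s) := by
    intro s
    have h := step (pvAbbrevTable.take 1) "parameter".toList "param".toList (by decide)
      (by decide) (by decide) (suffOK_sound _ _ (by decide)) s
    simpa [pvAbbrevTable] using h.symm
  have c3 : ∀ s, pvScan (pvAbbrevTable.take 3) s =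
      repS "variable".toList "var".toList (pvScan (pvAbbrevTable.take 2) s) := by
    intro s
    have h := step (pvAbbrevTable.take 2) "variable".toList "var".toList (by decide)
      (by decide) (by decide) (suffOK_sound _ _ (by decide)) s
    simpa [pvAbbrevTable] using h.symm
  have c4 : ∀ s, pvScan (pvAbbrevTable.take 4) s =
      repS "configuration".toList "config".toList (pvScan (pvAbbrevTable.take 3) s) := by
    intro s
    have h := step (pvAbbrevTable.take 3) "configuration".toList "config".toList (by decide)
      (by decide) (by decide) (suffOK_sound _ _ (by decide)) s
    simpa [pvAbbrevTable] using h.symm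
  have c5 : ∀ s, pvScan (pvAbbrevTable.take 5) s =
      repS "initialization".toList "init".toList (pvScan (pvAbbrevTable.take 4) s) := by
    intro s
    have h := step (pvAbbrevTable.take 4) "initialization".toList "init".toList (by decide)
      (by decide) (by decide) (suffOK_sound _ _ (by decide)) s
    simpa [pvAbbrevTable] using h.symm
  have c6 : ∀ s, pvScan pvAbbrevTable s =
      repS "optimization".toList "opt".toList (pvScan (pvAbbrevTable.take 5) s) := by
    intro s
    have h := step (pvAbbrevTable.take 5) "optimization".toList "opt".toList (by decide)
      (by decide) (by decide) (suffOK_sound _ _ (by decide)) s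
    simpa [pvAbbrevTable] using h.symm
  rw [c6, c5, c4, c3, c2, c1]

-- ===== VERDICT (by name: the statement is the Claim_ definition above) =====
theorem abbreviate_common_terms_py_spec : Claim_equal_abbreviate_common_terms_py := by
  intro content _
  unfold Spec_abbreviate_common_terms_py abbreviate_common_terms_py_alt
  rw [portA_unfold]
  have hlist : (PySem.Str.replace (PySem.Str.replace (PySem.Str.replace (PySem.Str.replace
      (PySem.Str.replace (PySem.Str.replace content "function" "fn") "parameter" "param")
      "variable" "var") "configuration" "config") "initialization" "init")
      "optimization" "opt").toList = pvScan pvAbbrevTable content.toList := by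
    simp only [PySem.Str.toList_replace]
    rw [replace_eq_repS _ "optimization".toList _ (by decide),
        replace_eq_repS _ "initialization".toList _ (by decide),
        replace_eq_repS _ "configuration".toList _ (by decide),
        replace_eq_repS _ "variable".toList _ (by decide),
        replace_eq_repS _ "parameter".toList _ (by decide),
        replace_eq_repS _ "function".toList _ (by decide)]
    exact (chain_eq_scan content.toList).symm
  refine Eq.trans (String.ofList_toList).symm ?_
  exact congrArg String.ofList hlist
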